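-- pv_equiv track=rewrite | github.com/lehgtrung/kgc | reasoning/extract_rules.py | form_rule
-- ===== SOURCE A (Python) =====
-- def form_rule(_rule):
--     result = f'{_rule[0]}(X,Y) :- {_rule[1]}(X,Z1)'
--     k = 1
--     for each in _rule[2:-1]:
--         result += f',{each}(Z{k},Z{k+1})'
--         k += 1
--     result += f',{_rule[-1]}(Z{k},Y).'
--     return result
-- ===== SOURCE B (Python) =====
-- def form_rule(_rule):
--     body = [_rule[1]] + list(_rule[2:-1]) + [_rule[-1]]
--     names = ['X'] + ['Z%d' % i for i in range(1, len(body))] + ['Y']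
--     atoms = [f'{b}({u},{v})' for b, u, v in zip(body, names, names[1:])]
--     return f'{_rule[0]}(X,Y) :- ' + ','.join(atoms) + '.'
-- ===== Notes on version B (the rewrite author's own statement) =====
-- stated objective: simpler
-- what changed: B precomputes an explicit body list and a parallel variable-name table, forms each atom by zipping adjacent variable pairs and joins them with ','.join, instead of A's single pass that threads a running counter k through incremental string concatenation.
import Mathlib
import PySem

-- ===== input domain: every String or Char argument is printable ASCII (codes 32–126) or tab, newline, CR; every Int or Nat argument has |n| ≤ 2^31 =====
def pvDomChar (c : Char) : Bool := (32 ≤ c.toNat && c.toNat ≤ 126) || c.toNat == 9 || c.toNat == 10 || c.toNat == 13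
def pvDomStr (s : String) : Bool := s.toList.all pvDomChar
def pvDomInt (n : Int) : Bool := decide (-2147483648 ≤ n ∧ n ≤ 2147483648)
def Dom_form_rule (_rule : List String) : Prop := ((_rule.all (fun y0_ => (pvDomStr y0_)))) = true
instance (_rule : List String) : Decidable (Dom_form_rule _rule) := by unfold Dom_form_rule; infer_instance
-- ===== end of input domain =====

-- B rebuilds the rule string from an explicit body/variable table (zip + join) instead of
-- threading a running counter through string concatenation; objective: simpler decomposition.

-- ===== PORT A =====
def form_rule (_rule : List String) : String :=
  let result := PySem.List.pyGetD _rule 0 "" ++ "(X,Y) :- " ++ PySem.List.pyGetD _rule 1 "" ++ "(X,Z1)"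
  let st := (PySem.List.slice _rule (some 2) (some (-1))).foldl
    (fun (st : String × Int) each =>
      (st.1 ++ ("," ++ each ++ "(Z" ++ PySem.Int.toStr st.2 ++ ",Z" ++ PySem.Int.toStr (st.2 + 1) ++ ")"), st.2 + 1))
    (result, 1)
  st.1 ++ ("," ++ PySem.List.pyGetD _rule (-1) "" ++ "(Z" ++ PySem.Int.toStr st.2 ++ ",Y).")

-- ===== PORT B =====
def form_rule_alt (_rule : List String) : String :=
  let body := [PySem.List.pyGetD _rule 1 ""] ++ PySem.List.slice _rule (some 2) (some (-1)) ++ [PySem.List.pyGetD _rule (-1) ""]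
  let vars := ["X"] ++ (PySem.List.pyRange 1 (body.length : Int) 1).map (fun i => "Z" ++ PySem.Int.toStr i) ++ ["Y"]
  let atoms := (body.zip (vars.zip (PySem.List.slice vars (some 1) none))).map
    (fun p => p.1 ++ "(" ++ p.2.1 ++ "," ++ p.2.2 ++ ")")
  PySem.List.pyGetD _rule 0 "" ++ "(X,Y) :- " ++ PySem.Str.join "," atoms ++ "."

-- ===== PRECONDITION & SPEC =====
-- A raises IndexError on lists of fewer than two elements (_rule[1]); those are excluded.
def Pre_form_rule (_rule : List String) : Prop := 2 ≤ _rule.length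
instance (_rule : List String) : Decidable (Pre_form_rule _rule) := by unfold Pre_form_rule; infer_instance
def pvWitness_form_rule : List String := (["p", "q", "r"])

def Spec_form_rule (_rule : List String) (out : String) : Prop := out = form_rule_alt _rule
instance (_rule : List String) (out : String) : Decidable (Spec_form_rule _rule out) := by unfold Spec_form_rule; infer_instance

-- ===== CLAIM (what is proved, stated in full; the proofs are below) =====
def Claim_equal_form_rule : Prop := ∀ (_rule : List String), Dom_form_rule _rule → Pre_form_rule _rule → Spec_form_rule _rule (form_rule _rule)

-- ===== LEMMAS AND PROOFS =====

-- A's running-tail: what the loop appends after the first atom, starting at counter k.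
def chunkA : List String → Int → String
  | [], _ => ""
  | e :: es, k => ("," ++ e ++ "(Z" ++ PySem.Int.toStr k ++ ",Z" ++ PySem.Int.toStr (k + 1) ++ ")") ++ chunkA es (k + 1)

-- B's tail: the comma-joined atoms after the first one, starting at variable Z k.
def chunkB : List String → Int → String → String
  | [], k, last => last ++ "(" ++ ("Z" ++ PySem.Int.toStr k) ++ "," ++ "Y" ++ ")"
  | e :: es, k, last =>
      (e ++ "(" ++ ("Z" ++ PySem.Int.toStr k) ++ "," ++ ("Z" ++ PySem.Int.toStr (k + 1)) ++ ")") ++ ("," ++ chunkB es (k + 1) last)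

-- the variable names Z k, Z (k+1), …, Z (k+m-1)
def zvars (k : Int) (m : Nat) : List String := (List.range m).map (fun j : Nat => "Z" ++ PySem.Int.toStr (k + (j : Int)))

theorem zvars_succ (k : Int) (m : Nat) :
    zvars k (m + 1) = ("Z" ++ PySem.Int.toStr k) :: zvars (k + 1) m := by
  unfold zvars
  rw [List.range_succ_eq_map, List.map_cons, List.map_map]
  congr 1
  · norm_num
  · apply List.map_congr_left
    intro j _
    simp only [Function.comp_apply]
    congr 2
    push_cast
    ring

theorem pyRange_one_eq_range (m : Nat) (a : Int) :
    PySem.List.pyRange a (a + m) 1 = (List.range m).map (fun k : Nat => a + (k : Int)) := by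
  unfold PySem.List.pyRange
  rw [if_neg one_ne_zero, if_pos one_pos]
  split_ifs with h
  · have h2 : ((a + ↑m - a + 1 - 1) / 1).toNat = m := by omega
    simp only [h2, one_mul]
  · have hm : m = 0 := by omega
    simp [hm]

theorem join_cons_ne (s a : String) (l : List String) (h : l ≠ []) :
    PySem.Str.join s (a :: l) = a ++ (s ++ PySem.Str.join s l) := by
  cases l with
  | nil => simp at h
  | cons b r => simp [PySem.Str.join, PySem.Chars.join_cons_cons]

theorem join_single (s a : String) : PySem.Str.join s [a] = a := by
  simp [PySem.Str.join, PySem.Chars.join, List.intercalate]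

theorem str_merge (a b c : String) (h : a ++ b = c) (x : String) : a ++ (b ++ x) = c ++ x := by
  rw [← String.append_assoc, h]

theorem loopA (es : List String) (r : String) (k : Int) :
    es.foldl
      (fun (st : String × Int) each =>
        (st.1 ++ ("," ++ each ++ "(Z" ++ PySem.Int.toStr st.2 ++ ",Z" ++ PySem.Int.toStr (st.2 + 1) ++ ")"), st.2 + 1))
      (r, k)
    = (r ++ chunkA es k, k + (es.length : Int)) := by
  induction es generalizing r k with
  | nil => simp [chunkA]
  | cons e es ih =>
    rw [List.foldl_cons, ih]
    simp only [chunkA, String.append_assoc, List.length_cons, Prod.mk.injEq]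
    refine ⟨by trivial, by push_cast; ring⟩

theorem joinB (es : List String) (L : String) (k : Int) :
    PySem.Str.join ","
      (((es ++ [L]).zip ((zvars k (es.length + 1) ++ ["Y"]).zip (zvars (k + 1) es.length ++ ["Y"]))).map
        (fun p => p.1 ++ "(" ++ p.2.1 ++ "," ++ p.2.2 ++ ")"))
    = chunkB es k L := by
  induction es generalizing k with
  | nil =>
    rw [zvars_succ]
    simp [zvars, join_single, chunkB]
  | cons e es ih =>
    simp only [List.length_cons]
    rw [zvars_succ k (es.length + 1), zvars_succ (k + 1) es.length]
    simp only [List.cons_append, List.zip_cons_cons, List.map_cons]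
    rw [join_cons_ne]
    · rw [show (("Z" ++ PySem.Int.toStr (k + 1)) :: (zvars (k + 1 + 1) es.length ++ ["Y"]))
            = (zvars (k + 1) (es.length + 1) ++ ["Y"]) from by rw [zvars_succ (k + 1) es.length]; simp]
      rw [ih (k + 1), chunkB]
    · simp

theorem bridge (es : List String) (k : Int) (L : String) :
    chunkA es k ++ ("," ++ L ++ "(Z" ++ PySem.Int.toStr (k + (es.length : Int)) ++ ",Y).")
    = ("," ++ chunkB es k L) ++ "." := by
  induction es generalizing k with
  | nil =>
    simp only [chunkA, chunkB, List.length_nil, Nat.cast_zero, add_zero]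
    simp only [String.append_assoc, String.empty_append]
    rw [str_merge "(" "Z" "(Z" rfl,
        show ("," : String) ++ ("Y" ++ (")" ++ ".")) = ",Y)." from rfl]
  | cons e es ih =>
    have hk : k + ((es.length + 1 : Nat) : Int) = (k + 1) + (es.length : Int) := by push_cast; ring
    simp only [chunkA, chunkB, List.length_cons, hk]
    have ih' := ih (k + 1)
    simp only [String.append_assoc] at ih' ⊢
    rw [ih', str_merge "(" "Z" "(Z" rfl, str_merge "," "Z" ",Z" rfl]

theorem core (r0 r1 L : String) (mid : List String) :
    (r0 ++ "(X,Y) :- " ++ r1 ++ "(X,Z1)" ++ chunkA mid 1)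
      ++ ("," ++ L ++ "(Z" ++ PySem.Int.toStr (1 + (mid.length : Int)) ++ ",Y).")
    = r0 ++ "(X,Y) :- "
      ++ ((r1 ++ "(" ++ "X" ++ "," ++ ("Z" ++ PySem.Int.toStr 1) ++ ")") ++ ("," ++ chunkB mid 1 L)) ++ "." := by
  rw [show (r1 ++ "(" ++ "X" ++ "," ++ ("Z" ++ PySem.Int.toStr 1) ++ ")") = r1 ++ "(X,Z1)" from by
        simp only [String.append_assoc]; congr 1]
  rw [String.append_assoc (s₂ := chunkA mid 1), bridge]
  simp only [String.append_assoc]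

-- ===== VERDICT (by name: the statement is the Claim_ definition above) =====
theorem form_rule_spec : Claim_equal_form_rule := by
  intro _rule hdom hpre
  unfold Spec_form_rule
  simp only [form_rule, form_rule_alt]
  rw [loopA]
  generalize PySem.List.pyGetD _rule 0 "" = r0
  generalize hr1 : PySem.List.pyGetD _rule 1 "" = r1
  generalize hL : PySem.List.pyGetD _rule (-1) "" = L
  generalize hmid : PySem.List.slice _rule (some 2) (some (-1)) = mid
  dsimp only
  have hlen : ([r1] ++ mid ++ [L]).length = mid.length + 2 := by simp
  rw [hlen, show ((mid.length + 2 : Nat) : Int) = 1 + ((mid.length + 1 : Nat) : Int) from by push_cast; ring,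
      pyRange_one_eq_range, List.map_map]
  rw [show List.map ((fun i => "Z" ++ PySem.Int.toStr i) ∘ fun k : Nat => 1 + (k : Int))
        (List.range (mid.length + 1)) = zvars 1 (mid.length + 1) from rfl]
  rw [PySem.List.slice_from_one]
  simp only [List.cons_append, List.nil_append, List.tail_cons]
  nth_rewrite 2 [zvars_succ 1 mid.length]
  simp only [List.cons_append, List.zip_cons_cons, List.map_cons]
  rw [join_cons_ne]
  · rw [joinB mid L 1]
    exact core r0 r1 L mid
  · simp
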